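-- pv_equiv track=rewrite | github.com/BigAngryDinosaur/amazonoa | min_total_wattage/solution.py | minTotalSum
-- ===== SOURCE A (Python) =====
-- def minTotalSum(bulb, k):
--     """
--     :type bulb: List[Integer]
--     :type k: Integer
--     :rtype: Integer
--     """
--     total = sum(bulb)
--     current_total = 0
--     mn = total if total > 0 else 0
--
--     for end in range(len(bulb)):
--         current_total += bulb[end]
--         if end >= k:
--             current_total -= bulb[end - k]
--         if end >= k - 1:
--             mn = min(mn, total - current_total)
--
--     return mn
-- ===== SOURCE B (Python) =====
-- def minTotalSum(bulb, k):
--     n = len(bulb)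
--     prefix = [0]
--     run = 0
--     for x in bulb:
--         run += x
--         prefix.append(run)
--     total = run
--     best = total if total > 0 else 0
--     for i in range(n - k + 1):
--         best = min(best, total - (prefix[i + k] - prefix[i]))
--     return best
-- ===== Notes on version B (the rewrite author's own statement) =====
-- stated objective: alternative
-- what changed: Replaced A's single-pass sliding-window accumulator (add the new element, subtract the element leaving the window) with a prefix-sum table built in one pass plus a second scan over window start positions computing each window as a prefix difference.
-- outside the precondition, e.g. on minTotalSum([], -1): A returns 0, B raises IndexError
import Mathlib
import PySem

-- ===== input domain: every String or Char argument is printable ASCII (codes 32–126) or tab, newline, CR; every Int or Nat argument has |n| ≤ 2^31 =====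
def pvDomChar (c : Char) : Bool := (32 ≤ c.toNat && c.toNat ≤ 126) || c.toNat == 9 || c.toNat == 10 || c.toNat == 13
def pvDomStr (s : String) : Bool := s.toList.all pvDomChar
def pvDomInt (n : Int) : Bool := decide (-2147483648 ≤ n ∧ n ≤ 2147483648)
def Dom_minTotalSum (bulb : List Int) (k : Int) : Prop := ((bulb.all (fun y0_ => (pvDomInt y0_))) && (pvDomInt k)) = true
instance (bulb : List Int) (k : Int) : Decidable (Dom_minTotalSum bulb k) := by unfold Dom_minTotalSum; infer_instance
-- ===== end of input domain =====

-- B replaces A's sliding-window accumulator by a prefix-sum table built in one pass plus a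
-- second scan over window starts (objective: alternative decomposition, same O(n) cost).

-- ===== PORT A =====
-- loop body of A's 'for end in range(len(bulb))', kept as a named helper
def stepA (bulb : List Int) (k total : Int) (st : Int × Int) (e : Int) : Int × Int :=
  let ct := st.1 + PySem.List.pyGetD bulb e 0
  let ct := if e ≥ k then ct - PySem.List.pyGetD bulb (e - k) 0 else ct
  let mn := if e ≥ k - 1 then min st.2 (total - ct) else st.2
  (ct, mn)

def minTotalSum (bulb : List Int) (k : Int) : Int :=
  let total := bulb.sum
  let init : Int × Int := (0, if total > 0 then total else 0)
  ((PySem.List.pyRange 0 (bulb.length : Int) 1).foldl (stepA bulb k total) init).2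

-- ===== PORT B =====
-- loop body of B's prefix-building 'for x in bulb', kept as a named helper
def stepPre (st : List Int × Int) (x : Int) : List Int × Int :=
  (st.1 ++ [st.2 + x], st.2 + x)

def minTotalSum_alt (bulb : List Int) (k : Int) : Int :=
  let p := bulb.foldl stepPre ([0], 0)
  let pre := p.1
  let total := p.2
  let best := if total > 0 then total else 0
  (PySem.List.pyRange 0 ((bulb.length : Int) - k + 1) 1).foldl
    (fun b i => min b (total - (PySem.List.pyGetD pre (i + k) 0 - PySem.List.pyGetD pre i 0))) best

-- ===== PRECONDITION & SPEC =====
-- Pre_ excludes negative k: on nonempty bulb A itself raises IndexError there, and on empty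
-- bulb (where A happens to return 0) B's prefix indexing raises IndexError, so those inputs
-- cannot be matched.
def Pre_minTotalSum (bulb : List Int) (k : Int) : Prop := 0 ≤ k
instance (bulb : List Int) (k : Int) : Decidable (Pre_minTotalSum bulb k) := by unfold Pre_minTotalSum; infer_instance
def pvWitness_minTotalSum : List Int × Int := ([1, -2, 3], 2)

def Spec_minTotalSum (bulb : List Int) (k : Int) (out : Int) : Prop := out = minTotalSum_alt bulb k
instance (bulb : List Int) (k : Int) (out : Int) : Decidable (Spec_minTotalSum bulb k out) := by unfold Spec_minTotalSum; infer_instance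

-- ===== CLAIM (what is proved, stated in full; the proofs are below) =====
def Claim_equal_minTotalSum : Prop := ∀ (bulb : List Int) (k : Int), Dom_minTotalSum bulb k → Pre_minTotalSum bulb k → Spec_minTotalSum bulb k (minTotalSum bulb k)

-- ===== LEMMAS AND PROOFS =====

-- prefix sums of bulb: S bulb m = sum of the first m elements
def S (bulb : List Int) (m : Nat) : Int := (bulb.take m).sum

lemma S_succ (bulb : List Int) (e : Nat) (h : e < bulb.length) :
    S bulb (e + 1) = S bulb e + bulb[e] := by
  simpa [S] using List.sum_take_succ bulb e h

lemma S_zero (bulb : List Int) : S bulb 0 = 0 := by simp [S]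

-- B's prefix-building fold, characterised
lemma pref_fold (bulb : List Int) : ∀ (acc : List Int) (s : Int),
    bulb.foldl stepPre (acc, s)
      = (acc ++ (List.range bulb.length).map (fun m => s + (bulb.take (m + 1)).sum), s + bulb.sum) := by
  induction bulb with
  | nil => intro acc s; simp
  | cons x xs ih =>
    intro acc s
    simp only [List.foldl_cons, stepPre, ih, List.length_cons, List.range_succ_eq_map,
      List.map_cons, List.map_map, Prod.mk.injEq]
    constructor
    · simp [Function.comp_def, List.append_assoc, add_assoc]
    · simp [add_assoc]

lemma pre_eq (bulb : List Int) :
    (bulb.foldl stepPre ([0], 0)).1 = (List.range (bulb.length + 1)).map (S bulb) := by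
  rw [pref_fold]
  simp [List.range_succ_eq_map, List.map_map, Function.comp, S]

lemma total_eq (bulb : List Int) : (bulb.foldl stepPre ([0], 0)).2 = bulb.sum := by
  rw [pref_fold]; simp

-- A's loop for k ≥ 1, characterised by induction on the processed length
lemma loopA_pos (bulb : List Int) (k : Int) (hk : 1 ≤ k) (seed : Int) :
    ∀ (m : Nat), m ≤ bulb.length →
    (List.range m).foldl (fun st (e : Nat) => stepA bulb k bulb.sum st (e : Int)) (0, seed)
      = (S bulb m - S bulb (m - k.toNat),
         ((List.range (m - (k.toNat - 1))).map
            (fun i => bulb.sum - (S bulb (i + k.toNat) - S bulb i))).foldl min seed) := by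
  intro m
  induction m with
  | zero => intro _; simp
  | succ m ih =>
    intro hm
    have hmn : m < bulb.length := by omega
    have hkN : (k.toNat : Int) = k := Int.toNat_of_nonneg (by omega)
    have hk1 : 1 ≤ k.toNat := by omega
    rw [List.range_succ, List.foldl_append, ih (by omega)]
    simp only [List.foldl_cons, List.foldl_nil, stepA]
    have hget : PySem.List.pyGetD bulb (m : Int) 0 = bulb[m] := by
      rw [PySem.List.pyGetD_natCast, List.getD_eq_getElem?_getD, List.getElem?_eq_getElem hmn,
        Option.getD_some]
    have hSm : S bulb (m + 1) = S bulb m + bulb[m] := S_succ bulb m hmn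
    by_cases hc : k.toNat ≤ m
    · -- window fully formed: the subtract branch fires
      have hge : ((m : Int) ≥ k) := by omega
      have hidx : (m : Int) - k = ((m - k.toNat : Nat) : Int) := by push_cast [hc]; omega
      have hmk : m - k.toNat < bulb.length := by omega
      have hget2 : PySem.List.pyGetD bulb ((m : Int) - k) 0 = bulb[m - k.toNat] := by
        rw [hidx, PySem.List.pyGetD_natCast, List.getD_eq_getElem?_getD,
          List.getElem?_eq_getElem hmk, Option.getD_some]
      have hSmk : S bulb (m + 1 - k.toNat) = S bulb (m - k.toNat) + bulb[m - k.toNat] := by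
        have h : m + 1 - k.toNat = (m - k.toNat) + 1 := by omega
        rw [h, S_succ bulb _ hmk]
      have hge' : ((m : Int) ≥ k - 1) := by omega
      have hcnt : m + 1 - (k.toNat - 1) = (m - (k.toNat - 1)) + 1 := by omega
      have hi1 : m - (k.toNat - 1) + k.toNat = m + 1 := by omega
      have hi2 : m - (k.toNat - 1) = m + 1 - k.toNat := by omega
      rw [if_pos hge, if_pos hge', hcnt, List.range_succ, List.map_append, List.foldl_append]
      simp only [List.map_cons, List.map_nil, List.foldl_cons, List.foldl_nil, hi2,
        Prod.mk.injEq]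
      rw [hget, hget2]
      constructor
      · rw [hSm, hSmk]; ring
      · have hi3 : m + 1 - k.toNat + k.toNat = m + 1 := by omega
        congr 1
        rw [hi3, hSm, hSmk]; ring
    · -- window not yet formed: no subtraction
      have hnge : ¬ ((m : Int) ≥ k) := by omega
      have hz1 : m - k.toNat = 0 := by omega
      rw [if_neg hnge, hget]
      by_cases hb : k.toNat = m + 1
      · -- the first complete window ends exactly at m
        have hz2 : m + 1 - k.toNat = 0 := by omega
        have hge' : ((m : Int) ≥ k - 1) := by omega
        have hcnt : m + 1 - (k.toNat - 1) = (m - (k.toNat - 1)) + 1 := by omega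
        have hi2 : m - (k.toNat - 1) = 0 := by omega
        rw [if_pos hge', hcnt, List.range_succ, List.map_append, List.foldl_append]
        simp only [List.map_cons, List.map_nil, List.foldl_cons, List.foldl_nil,
          Prod.mk.injEq]
        have hi4 : m - (k.toNat - 1) + k.toNat = m + 1 := by omega
        constructor
        · rw [hz1, hz2, S_zero, hSm]; ring
        · congr 1
          rw [hi4, hi2, hz1, S_zero, hSm]; ring
      · -- still strictly inside the first (incomplete) window
        have hnge' : ¬ ((m : Int) ≥ k - 1) := by omega
        have hz2 : m + 1 - k.toNat = 0 := by omega
        have hcnt : m + 1 - (k.toNat - 1) = m - (k.toNat - 1) := by omega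
        rw [if_neg hnge', hcnt]
        simp only [hz1, hz2, S_zero, Prod.mk.injEq]
        refine ⟨by rw [hSm]; ring, trivial⟩


-- A's loop for k = 0, characterised
lemma loopA_zero (bulb : List Int) (seed : Int) :
    ∀ (m : Nat), m ≤ bulb.length →
    (List.range m).foldl (fun st (e : Nat) => stepA bulb 0 bulb.sum st (e : Int)) (0, seed)
      = (0, if m = 0 then seed else min seed bulb.sum) := by
  intro m
  induction m with
  | zero => intro _; simp
  | succ m ih =>
    intro hm
    rw [List.range_succ, List.foldl_append, ih (by omega)]
    simp only [List.foldl_cons, List.foldl_nil, stepA]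
    have h1 : ((m : Int) ≥ 0) := by omega
    have h2 : ((m : Int) ≥ 0 - 1) := by omega
    rw [if_pos h1, if_pos h2]
    simp only [sub_zero, zero_add, sub_self]
    rcases Nat.eq_zero_or_pos m with h | h
    · simp [h]
    · have : m ≠ 0 := by omega
      simp [this]


-- folding min with a constant over an index range
lemma foldl_min_const (t s : Int) : ∀ m : Nat,
    (List.range m).foldl (fun b (_ : Nat) => min b t) s = if m = 0 then s else min s t := by
  intro m
  induction m with
  | zero => simp
  | succ m ih =>
    rw [List.range_succ, List.foldl_append, ih]
    rcases Nat.eq_zero_or_pos m with h | h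
    · simp [h]
    · have h0 : m ≠ 0 := by omega
      simp [h0]

-- B's second loop, rewritten as a fold over a Nat range of prefix-difference values
lemma altB (bulb : List Int) (k : Int) (hk : 0 ≤ k) :
    minTotalSum_alt bulb k
      = ((List.range (bulb.length + 1 - k.toNat)).map
           (fun i => bulb.sum - (S bulb (i + k.toNat) - S bulb i))).foldl min
          (if bulb.sum > 0 then bulb.sum else 0) := by
  have hkN : (k.toNat : Int) = k := Int.toNat_of_nonneg hk
  show ((PySem.List.pyRange 0 ((bulb.length : Int) - k + 1) 1).foldl
      (fun b i => min b ((bulb.foldl stepPre ([0], 0)).2 -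
        (PySem.List.pyGetD (bulb.foldl stepPre ([0], 0)).1 (i + k) 0 -
         PySem.List.pyGetD (bulb.foldl stepPre ([0], 0)).1 i 0)))
      (if (bulb.foldl stepPre ([0], 0)).2 > 0 then (bulb.foldl stepPre ([0], 0)).2 else 0)) = _
  rw [total_eq, pre_eq]
  have hrange : PySem.List.pyRange 0 ((bulb.length : Int) - k + 1) 1
      = List.map (fun i : Nat => (i : Int)) (List.range (bulb.length + 1 - k.toNat)) := by
    by_cases hle : k.toNat ≤ bulb.length + 1
    · have h : (bulb.length : Int) - k + 1 = ((bulb.length + 1 - k.toNat : Nat) : Int) := by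
        push_cast [hle]; omega
      rw [h, PySem.List.pyRange_zero_nat]
    · have h1 : (bulb.length : Int) - k + 1 ≤ 0 := by omega
      have h2 : bulb.length + 1 - k.toNat = 0 := by omega
      rw [PySem.List.pyRange_one_eq_nil h1, h2]
      simp
  rw [hrange, List.foldl_map]
  rw [PySem.List.foldl_congr_mem _ _
    (fun b (i : Nat) => min b (bulb.sum - (S bulb (i + k.toNat) - S bulb i))) _ ?_]
  · rw [List.foldl_map]
  · intro acc i hi
    have hi' : i < bulb.length + 1 - k.toNat := List.mem_range.mp hi
    have h1 : (i : Int) + k = ((i + k.toNat : Nat) : Int) := by push_cast; omega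
    have h2 : i + k.toNat < bulb.length + 1 := by omega
    have h3 : i < bulb.length + 1 := by omega
    rw [h1, PySem.List.pyGetD_natCast, PySem.List.pyGetD_natCast,
      PySem.List.getD_map_range _ _ _ _ h2, PySem.List.getD_map_range _ _ _ _ h3]

-- ===== VERDICT (by name: the statement is the Claim_ definition above) =====
theorem minTotalSum_spec : Claim_equal_minTotalSum := by
  intro bulb k _ hk
  have hk' : (0:Int) ≤ k := hk
  unfold Spec_minTotalSum
  rw [altB bulb k hk']
  show ((PySem.List.pyRange 0 (bulb.length : Int) 1).foldl (stepA bulb k bulb.sum)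
      (0, if bulb.sum > 0 then bulb.sum else 0)).2 = _
  rw [PySem.List.pyRange_zero_nat, List.foldl_map]
  by_cases hk1 : 1 ≤ k
  · rw [loopA_pos bulb k hk1 _ bulb.length le_rfl]
    have hcnt : bulb.length - (k.toNat - 1) = bulb.length + 1 - k.toNat := by omega
    rw [hcnt]
  · have hk0 : k = 0 := by omega
    subst hk0
    rw [loopA_zero bulb _ bulb.length le_rfl]
    have h0 : ((0:Int)).toNat = 0 := rfl
    rw [h0]
    have hmap : (List.range (bulb.length + 1 - 0)).map
        (fun i => bulb.sum - (S bulb (i + 0) - S bulb i))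
        = (List.range (bulb.length + 1)).map (fun _ => bulb.sum) := by
      simp
    rw [hmap, List.foldl_map, foldl_min_const]
    rcases Nat.eq_zero_or_pos bulb.length with h | h
    · have hnil : bulb = [] := List.eq_nil_of_length_eq_zero h
      subst hnil
      simp
    · have h1 : bulb.length ≠ 0 := by omega
      simp [h1]
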